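-- pv_equiv track=rewrite | github.com/Romshtin/First-GIT-repository | Python_course_Vadim_Ksendzov/HW_5.py | div_5
-- ===== SOURCE A (Python) =====
-- def div_5(list):
--     list_parts = []
--     new_full_list = []
--     count = 0
--     for i in list:
--         count += 1
--         if count < 5:
--             list_parts.append(i)
--         else:
--             list_parts.append(i)
--             new_full_list.append(list_parts)
--             list_parts = []
--             count = 0
--     return new_full_list
-- ===== SOURCE B (Python) =====
-- def div_5(list):
--     out = []
--     while len(list) >= 5:
--         out.append(list[:5])
--         list = list[5:]
--     return out
-- ===== Notes on version B (the rewrite author's own statement) =====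
-- stated objective: simpler
-- what changed: Replaced the per-element counter that accumulates into a scratch list and resets at 5 by a loop that repeatedly slices off the first five elements (list[:5] / list[5:]) while at least five remain, dropping the remainder by the loop bound.
import Mathlib
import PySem

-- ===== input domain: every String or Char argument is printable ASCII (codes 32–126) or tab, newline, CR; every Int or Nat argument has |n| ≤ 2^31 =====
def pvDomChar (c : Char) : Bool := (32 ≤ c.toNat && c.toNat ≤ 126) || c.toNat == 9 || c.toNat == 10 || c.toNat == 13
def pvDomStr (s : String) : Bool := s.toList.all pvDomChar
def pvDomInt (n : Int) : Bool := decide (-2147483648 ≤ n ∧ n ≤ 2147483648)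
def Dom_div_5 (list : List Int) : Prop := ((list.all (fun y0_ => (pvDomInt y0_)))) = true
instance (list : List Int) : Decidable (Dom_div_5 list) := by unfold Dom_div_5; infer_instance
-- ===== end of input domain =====

-- B replaces A's per-element counter with accumulate-and-reset by repeated slicing
-- of the first five elements while at least five remain (objective: simpler).

-- ===== PORT A =====
-- A's for-loop over the input with state (list_parts, new_full_list, count)
def div5Go : List Int → List Int → List (List Int) → Int → List (List Int)
  | [], _, new_full_list, _ => new_full_list
  | i :: rest, list_parts, new_full_list, count =>
    if count + 1 < 5 then
      div5Go rest (list_parts ++ [i]) new_full_list (count + 1)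
    else
      div5Go rest [] (new_full_list ++ [list_parts ++ [i]]) 0

def div_5 (list : List Int) : List (List Int) := div5Go list [] [] 0

-- ===== PORT B =====
-- B's while-loop: while len(list) >= 5: out.append(list[:5]); list = list[5:]
def div5AltGo (items : List Int) (out : List (List Int)) : List (List Int) :=
  if 5 ≤ items.length then
    div5AltGo (PySem.List.slice items (some 5) none) (out ++ [PySem.List.slice items none (some 5)])
  else out
termination_by items.length
decreasing_by simp [PySem.List.slice]; omega

def div_5_alt (list : List Int) : List (List Int) := div5AltGo list []

-- ===== PRECONDITION & SPEC =====
def Spec_div_5 (list : List Int) (out : List (List Int)) : Prop := out = div_5_alt list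
instance (list : List Int) (out : List (List Int)) : Decidable (Spec_div_5 list out) := by unfold Spec_div_5; infer_instance

-- ===== CLAIM (what is proved, stated in full; the proofs are below) =====
def Claim_equal_div_5 : Prop := ∀ (list : List Int), Dom_div_5 list → Spec_div_5 list (div_5 list)

-- ===== LEMMAS AND PROOFS =====

-- common characterisation: the list of complete 5-chunks
def chunk5 : List Int → List (List Int)
  | a :: b :: c :: d :: e :: rest => [a, b, c, d, e] :: chunk5 rest
  | _ => []

theorem div5Go_chunk : ∀ (n : Nat) (l : List Int), l.length ≤ n →
    ∀ full, div5Go l [] full 0 = full ++ chunk5 l := by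
  intro n
  induction n with
  | zero =>
    intro l hl full
    match l, hl with
    | [], _ => simp [div5Go, chunk5]
  | succ n ih =>
    intro l hl full
    match l with
    | [] => simp [div5Go, chunk5]
    | [a] => simp [div5Go, chunk5]
    | [a, b] => simp [div5Go, chunk5]
    | [a, b, c] => simp [div5Go, chunk5]
    | [a, b, c, d] => simp [div5Go, chunk5]
    | a :: b :: c :: d :: e :: rest =>
      have hr : rest.length ≤ n := by simp at hl; omega
      simp only [div5Go, chunk5]
      norm_num
      rw [ih rest hr]
      simp

theorem div5AltGo_chunk : ∀ (n : Nat) (l : List Int), l.length ≤ n →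
    ∀ out, div5AltGo l out = out ++ chunk5 l := by
  intro n
  induction n with
  | zero =>
    intro l hl out
    match l, hl with
    | [], _ => simp [div5AltGo, chunk5]
  | succ n ih =>
    intro l hl out
    match l with
    | [] => rw [div5AltGo]; simp [chunk5]
    | [a] => rw [div5AltGo]; simp [chunk5]
    | [a, b] => rw [div5AltGo]; simp [chunk5]
    | [a, b, c] => rw [div5AltGo]; simp [chunk5]
    | [a, b, c, d] => rw [div5AltGo]; simp [chunk5]
    | a :: b :: c :: d :: e :: rest =>
      have hr : rest.length ≤ n := by simp at hl; omega
      rw [div5AltGo]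
      have h1 : PySem.List.slice (a :: b :: c :: d :: e :: rest) (some 5) none = rest := by
        simp [PySem.List.slice]
      have h2 : PySem.List.slice (a :: b :: c :: d :: e :: rest) none (some 5) = [a, b, c, d, e] := by
        simp [PySem.List.slice]
      simp only [List.length_cons, h1, h2]
      rw [if_pos (by omega), ih rest hr]
      simp [chunk5]

-- ===== VERDICT (by name: the statement is the Claim_ definition above) =====
theorem div_5_spec : Claim_equal_div_5 := by
  intro l _
  unfold Spec_div_5 div_5 div_5_alt
  rw [div5Go_chunk l.length l le_rfl, div5AltGo_chunk l.length l le_rfl]
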